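-- pv_equiv track=rewrite | github.com/jyan500/Python-Data-Structures-And-Algos | neetcode all and misc questions/Arrays and Strings/group_shifted_strings.py | groupShiftedStrings
-- ===== SOURCE A (Python) =====
-- def groupShiftedStrings(strList: [str]) -> [[str]]:
--     """
--     The brute force solution is to compare each string to every other string
--     O(N^2)
--
--     To determine distance, we can assign each character to a numerical value within a hashmap
--     {
--         "a": 0,
--         "b": 1,
--         ...
--         "z": 25
--     }
--     1) you would check only the strings that have the same length, since we can only shift characters and not add/remove them
--     from a given string.
--     2) abc bcd
--     a -> b is one character apart
--     b -> c is one character apart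
--     c -> d is one character apart
--
--     so this is valid
--     abc xyz
--     a -> x  23 characters
--     b -> y  23 characters
--     c -> z  23 characters
--
--     also valid
--
--     az ba
--     note that in this case a -> b is one distance,
--     z -> a is also one distance, but it rotates around. So in order to compare the relative distance
--     where in value1 -> value2, map[value1] > map[value2],
--     you can perform map[value1] - 26, i.e where z: 25, 25 - 26 = -1, and you compare -1 to 0
--
--     Midway through the problem, I realized its difficult group strings like this,
--     since if the distances between two strings aren't the same, how would this case be grouped?
--
--     for example,
--     "abc", "aaa", these are not in the same group. Would I determine to split off a new group for ones that are in the same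
--     shift group as "abc", and another for "aaa"?
--
--     Optimization:
--
--     I'm thinking if its easier to check the distance between each of the characters
--     on individual strings instead, as long as the len(str) > 1
--
--     "abc" has a distance of 1 between each character, like so: 11,
--     so any string that has this shift pattern, like
--     "bcd", "xyz", where the distance between each character is 1, will match.
--
--     "aca" has a distance pattern like so a -> c is 2 chars, c->a is also two characters, 22,
--     and then group the strings based on this pattern
--
--     "az" has a distance of 25
--     "ba" also has a distance of 25 too, since we're going backwards
--
--     so we still need to apply the logic of subtracting by 26 first if value1 > value2
--
--     This version:
--     O(N*M) Time, where N is the size of the list, and M is the length of each word in the list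
--     O(N) Space
--
--     """
--
--     from collections import defaultdict
--     letters = {}
--     chars = "abcdefghijklmnopqrstuvwxyz"
--     for i in range(len(chars)):
--         letters[chars[i]] = i
--
--     def getShiftPattern(s1):
--         # compare the distance between each character of the string
--         shift = []
--         for i in range(1, len(s1)):
--             cur = letters[s1[i]]
--             prev = letters[s1[i-1]]
--             # note that if we're looping back around
--             # i.e b -> a, or z -> a, where the first value is greater than the second,
--             # we do (prev - 26) first, since b -> a, we technically do 25 more shifts
--             # to get all the way back to a
--             shift.append(abs(prev-26-cur) if prev > cur else abs(cur-prev))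
--         return tuple(shift)
--
--     grouped = defaultdict(list)
--     for i in range(len(strList)):
--         shiftPattern = getShiftPattern(strList[i])
--         grouped[shiftPattern].append(strList[i])
--     # convert to nested list
--     return [value for value in grouped.values()]
-- ===== SOURCE B (Python) =====
-- def groupShiftedStrings(strList):
--     # No hashmap: keep a list of groups and, for each string, linearly scan the
--     # existing groups comparing shift patterns against each group's first member.
--     def pattern(s):
--         return [(ord(b) - ord(a)) % 26 for a, b in zip(s, s[1:])]
--
--     groups = []
--     for s in strList:
--         p = pattern(s)
--         for g in groups:
--             if pattern(g[0]) == p: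
--                 g.append(s)
--                 break
--         else:
--             groups.append([s])
--     return groups
-- ===== Notes on version B (the rewrite author's own statement) =====
-- stated objective: alternative
-- what changed: Replaces the letters hashmap and the pattern-keyed defaultdict with a direct list of groups: each string's (ord-difference mod 26) pattern is compared by a linear scan against the recomputed pattern of the first member of each existing group, appending to the first match or opening a new group.
import Mathlib
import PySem

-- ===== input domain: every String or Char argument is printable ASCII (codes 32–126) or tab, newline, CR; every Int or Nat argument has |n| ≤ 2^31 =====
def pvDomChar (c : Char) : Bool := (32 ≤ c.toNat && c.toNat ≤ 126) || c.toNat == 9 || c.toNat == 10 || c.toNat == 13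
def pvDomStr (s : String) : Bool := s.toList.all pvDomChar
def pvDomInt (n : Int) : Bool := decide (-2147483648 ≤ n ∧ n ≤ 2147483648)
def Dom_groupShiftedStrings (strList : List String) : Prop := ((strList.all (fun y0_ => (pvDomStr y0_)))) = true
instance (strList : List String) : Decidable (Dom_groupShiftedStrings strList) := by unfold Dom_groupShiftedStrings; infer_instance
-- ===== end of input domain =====

-- B drops A's letters hashmap and pattern-keyed defaultdict: it keeps a plain list of groups
-- and appends each string to the first group whose first member has the same mod-26
-- shift pattern (alternative decomposition, not claimed faster).

-- ===== PORT A =====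
-- chars = "abcdefghijklmnopqrstuvwxyz"
def pvCharsA : List Char := ['a','b','c','d','e','f','g','h','i','j','k','l','m','n','o','p','q','r','s','t','u','v','w','x','y','z']

-- letters = {}; for i in range(len(chars)): letters[chars[i]] = i
def pvLettersA : PySem.Dict Char Int :=
  (PySem.List.pyRange 0 (pvCharsA.length : Int) 1).foldl
    (fun d i => d.insert (PySem.List.pyGetD pvCharsA i ' ') i) PySem.Dict.empty

-- one iteration of getShiftPattern's loop; letters[s[i]] is a Dict.get? lookup:
-- none = Python's KeyError (a char outside a-z), excluded by Pre_
def pvStepA (cs : List Char) (acc : Option (List Int)) (i : Int) : Option (List Int) :=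
  match acc, pvLettersA.get? (PySem.List.pyGetD cs i ' '), pvLettersA.get? (PySem.List.pyGetD cs (i-1) ' ') with
  | some shift, some cur, some prev =>
      some (shift ++ [if prev > cur then |prev - 26 - cur| else |cur - prev|])
  | _, _, _ => none

def getShiftPatternA (cs : List Char) : Option (List Int) :=
  (PySem.List.pyRange 1 (cs.length : Int) 1).foldl (pvStepA cs) (some [])

-- grouped = defaultdict(list); for i in range(len(strList)): grouped[getShiftPattern(strList[i])].append(strList[i])
-- return [value for value in grouped.values()]
-- (a none pattern is Python's KeyError: the loop body cannot run; unreachable under Pre_)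
def groupShiftedStrings (strList : List String) : List (List String) :=
  ((PySem.List.pyRange 0 (strList.length : Int) 1).foldl
    (fun d i =>
      match getShiftPatternA (PySem.List.pyGetD strList i "").toList with
      | some p => d.modify p [] (fun v => v ++ [PySem.List.pyGetD strList i ""])
      | none => d)
    PySem.Dict.empty).values

-- ===== PORT B =====
-- pattern(s) = [(ord(b) - ord(a)) % 26 for a, b in zip(s, s[1:])]
def patternB (cs : List Char) : List Int :=
  (cs.zip (PySem.List.slice cs (some 1) none)).map
    (fun ab => PySem.Int.mod ((ab.2.toNat : Int) - (ab.1.toNat : Int)) 26)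

-- inner for-loop over groups: append s to the first group whose first member's
-- pattern equals p, else (for-else) open a new group; groups are nonempty, so
-- g[0] is g.headD ""
def insertB (p : List Int) (s : String) : List (List String) → List (List String)
  | [] => [[s]]
  | g :: gs =>
      if patternB ((g.headD "").toList) = p then (g ++ [s]) :: gs
      else g :: insertB p s gs

def groupShiftedStrings_alt (strList : List String) : List (List String) :=
  strList.foldl (fun gs s => insertB (patternB s.toList) s gs) []

-- ===== PRECONDITION & SPEC =====
-- Pre_ excludes exactly the inputs where A raises KeyError: a string of length ≥ 2
-- with a character outside lowercase a-z (the letters map's only keys).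
def Pre_groupShiftedStrings (strList : List String) : Prop :=
  ∀ s ∈ strList, 2 ≤ s.toList.length → s.toList.all (fun c => pvCharsA.contains c) = true
instance (strList : List String) : Decidable (Pre_groupShiftedStrings strList) := by
  unfold Pre_groupShiftedStrings; infer_instance

def pvWitness_groupShiftedStrings : List String := ["abc", "bcd", "az", "ba", "a", "", "xyz"]

def Spec_groupShiftedStrings (strList : List String) (out : List (List String)) : Prop :=
  out = groupShiftedStrings_alt strList
instance (strList : List String) (out : List (List String)) : Decidable (Spec_groupShiftedStrings strList out) := by
  unfold Spec_groupShiftedStrings; infer_instance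

-- ===== CLAIM (what is proved, stated in full; the proofs are below) =====
def Claim_equal_groupShiftedStrings : Prop := ∀ (strList : List String), Dom_groupShiftedStrings strList → Pre_groupShiftedStrings strList → Spec_groupShiftedStrings strList (groupShiftedStrings strList)

-- ===== LEMMAS AND PROOFS =====

-- the Bool-level precondition on one string, in ∀-∈ form
lemma pre_conv (s : String)
    (h : 2 ≤ s.toList.length → s.toList.all (fun c => pvCharsA.contains c) = true) :
    2 ≤ s.toList.length → ∀ c ∈ s.toList, c ∈ pvCharsA := by
  intro hl c hc
  have := List.all_eq_true.mp (h hl) c hc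
  simpa using this

-- the key under which B's scan files a group: the pattern of its first member
def keyG (g : List String) : List Int := patternB ((g.headD "").toList)

set_option maxRecDepth 4000 in
lemma lettersA_eq : pvLettersA = PySem.Dict.mk [('a', 0), ('b', 1), ('c', 2), ('d', 3), ('e', 4), ('f', 5), ('g', 6), ('h', 7), ('i', 8), ('j', 9), ('k', 10), ('l', 11), ('m', 12), ('n', 13), ('o', 14), ('p', 15), ('q', 16), ('r', 17), ('s', 18), ('t', 19), ('u', 20), ('v', 21), ('w', 22), ('x', 23), ('y', 24), ('z', 25)] := by
  decide

set_option maxRecDepth 4000 in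
lemma lettersA_lookup : ∀ c ∈ pvCharsA, pvLettersA.get? c = some ((c.toNat : Int) - 97) := by
  rw [lettersA_eq]
  intro c hc
  fin_cases hc <;> decide

set_option maxRecDepth 4000 in
lemma charsA_bounds : ∀ c ∈ pvCharsA, 97 ≤ c.toNat ∧ c.toNat ≤ 122 := by
  intro c hc
  fin_cases hc <;> decide

-- A's per-pair value equals B's mod-26 ord difference, for lowercase a (prev), b (cur)
lemma pair_value_eq (a b : Char) (ha : a ∈ pvCharsA) (hb : b ∈ pvCharsA) :
    (if ((a.toNat : Int) - 97) > ((b.toNat : Int) - 97)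
     then |((a.toNat : Int) - 97) - 26 - ((b.toNat : Int) - 97)|
     else |((b.toNat : Int) - 97) - ((a.toNat : Int) - 97)|)
      = PySem.Int.mod ((b.toNat : Int) - (a.toNat : Int)) 26 := by
  obtain ⟨ha1, ha2⟩ := charsA_bounds a ha
  obtain ⟨hb1, hb2⟩ := charsA_bounds b hb
  have hmul := PySem.Int.floordiv_mul_add_mod ((b.toNat : Int) - (a.toNat : Int)) 26
  have hnn := PySem.Int.mod_nonneg ((b.toNat : Int) - (a.toNat : Int)) (b := 26) (by norm_num)
  have hlt := PySem.Int.mod_lt ((b.toNat : Int) - (a.toNat : Int)) (b := 26) (by norm_num)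
  split_ifs with h
  · rw [abs_of_neg (by omega)]
    omega
  · rw [abs_of_nonneg (by omega)]
    omega

lemma foldA_some (cs : List Char) : ∀ (l : List Int) (sh : List Int),
    (∀ i ∈ l, PySem.List.pyGetD cs i ' ' ∈ pvCharsA ∧ PySem.List.pyGetD cs (i-1) ' ' ∈ pvCharsA) →
    l.foldl (pvStepA cs) (some sh)
      = some (sh ++ l.map (fun i =>
          PySem.Int.mod (((PySem.List.pyGetD cs i ' ').toNat : Int)
            - ((PySem.List.pyGetD cs (i-1) ' ').toNat : Int)) 26)) := by
  intro l
  induction l with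
  | nil => intro sh _; simp
  | cons i t ih =>
    intro sh h
    obtain ⟨hc, hp⟩ := h i (by simp)
    have ht : ∀ j ∈ t, PySem.List.pyGetD cs j ' ' ∈ pvCharsA ∧ PySem.List.pyGetD cs (j-1) ' ' ∈ pvCharsA :=
      fun j hj => h j (by simp [hj])
    have hstep : pvStepA cs (some sh) i
        = some (sh ++ [PySem.Int.mod (((PySem.List.pyGetD cs i ' ').toNat : Int)
            - ((PySem.List.pyGetD cs (i-1) ' ').toNat : Int)) 26]) := by
      unfold pvStepA
      rw [lettersA_lookup _ hc, lettersA_lookup _ hp]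
      exact congrArg (fun z => some (sh ++ [z])) (pair_value_eq _ _ hp hc)
    simp only [List.foldl_cons, hstep, ih _ ht, List.map_cons, List.append_assoc,
      List.singleton_append]

-- pattern agreement: wherever A's getShiftPattern returns (all chars lowercase when
-- the string has length ≥ 2), it returns exactly B's pattern
lemma pattern_agree (cs : List Char) (h : 2 ≤ cs.length → ∀ c ∈ cs, c ∈ pvCharsA) :
    getShiftPatternA cs = some (patternB cs) := by
  by_cases hn : 2 ≤ cs.length
  · have hall := h hn
    unfold getShiftPatternA
    rw [foldA_some cs _ [] ?hmem]
    case hmem =>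
      intro i hi
      rw [PySem.List.mem_pyRange_one] at hi
      constructor
      · rw [PySem.List.pyGetD_eq_getElem cs ' ' (by omega) (by omega)]
        exact hall _ (List.getElem_mem _)
      · rw [PySem.List.pyGetD_eq_getElem cs ' ' (by omega) (by omega)]
        exact hall _ (List.getElem_mem _)
    refine congrArg some ?_
    rw [List.nil_append, patternB, PySem.List.slice_from_one]
    apply List.ext_getElem
    · simp [PySem.List.length_pyRange_one]
    · intro k hk1 hk2
      have hkn : k + 1 < cs.length := by
        simp [PySem.List.length_pyRange_one] at hk1; omega
      simp only [List.getElem_map, PySem.List.getElem_pyRange_one, List.getElem_zip, List.getElem_tail]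
      have e1 : (1:Int) + (k:Int) = ((k+1 : Nat) : Int) := by push_cast; ring
      have e2 : ((k+1 : Nat) : Int) - 1 = ((k : Nat) : Int) := by push_cast; ring
      rw [e1, e2, PySem.List.pyGetD_natCast, PySem.List.pyGetD_natCast,
        List.getD_eq_getElem _ _ hkn, List.getD_eq_getElem _ _ (by omega)]
  · match cs, hn with
    | [], _ => rfl
    | [c], _ => rfl
    | c :: d :: t, hn => simp at hn

lemma headD_append (g : List String) (s : String) (h : g ≠ []) :
    (g ++ [s]).headD "" = g.headD "" := by
  cases g with
  | nil => exact absurd rfl h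
  | cons a t => rfl

-- defaultdict update on a key absent from the first entry skips that entry
lemma modify_cons {κ ν : Type} [BEq κ] [LawfulBEq κ] (k : κ) (v : ν) (l : List (κ × ν))
    (p : κ) (hk : k ≠ p) (dflt : ν) (f : ν → ν) :
    ((PySem.Dict.mk ((k,v) :: l)).modify p dflt f).items
      = (k,v) :: ((PySem.Dict.mk l).modify p dflt f).items := by
  by_cases hc : l.any (fun q => q.1 == p)
  · simp [PySem.Dict.modify, PySem.Dict.insert, PySem.Dict.contains, PySem.Dict.getD,
      PySem.Dict.get?, hc, hk]
  · simp [PySem.Dict.modify, PySem.Dict.insert, PySem.Dict.contains, PySem.Dict.getD,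
      PySem.Dict.get?, hc, hk]

-- defaultdict update on the first entry's key updates it in place
lemma modify_head_match {κ ν : Type} [BEq κ] [LawfulBEq κ] (k : κ) (v : ν)
    (l : List (κ × ν)) (p : κ) (hk : k = p) (hrest : ∀ q ∈ l, q.1 ≠ p)
    (dflt : ν) (f : ν → ν) :
    ((PySem.Dict.mk ((k,v) :: l)).modify p dflt f).items = (p, f v) :: l := by
  subst hk
  have hrest' : l.map (fun q => if q.1 == k then (k, f v) else q) = l := by
    have h2 : ∀ q ∈ l, (fun q => if (q.1 == k) = true then (k, f v) else q) q = id q := by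
      intro q hq
      simp [hrest q hq]
    rw [List.map_congr_left h2, List.map_id]
  simp [PySem.Dict.modify, PySem.Dict.insert, PySem.Dict.contains, PySem.Dict.getD,
    PySem.Dict.get?, hrest']

-- one step: A's defaultdict append mirrors B's first-match group insertion
lemma modify_items (s : String) :
    ∀ (gs : List (List String)), (∀ g ∈ gs, g ≠ []) → ((gs.map keyG).Nodup) →
    ((PySem.Dict.mk (gs.map (fun g => (keyG g, g)))).modify (keyG [s]) []
        (fun v => v ++ [s])).items
      = (insertB (keyG [s]) s gs).map (fun g => (keyG g, g)) := by
  intro gs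
  induction gs with
  | nil =>
    intro _ _
    simp [insertB, PySem.Dict.modify, PySem.Dict.insert, PySem.Dict.getD,
      PySem.Dict.get?, PySem.Dict.contains]
  | cons g t ih =>
    intro hne hnd
    simp only [List.map_cons, List.nodup_cons] at hnd
    by_cases hk : keyG g = keyG [s]
    · have hrest : ∀ q ∈ t.map (fun g => (keyG g, g)), q.1 ≠ keyG [s] := by
        intro q hq
        obtain ⟨g', hg', rfl⟩ := List.mem_map.mp hq
        exact fun he => hnd.1 (hk ▸ he ▸ List.mem_map_of_mem hg')
      rw [List.map_cons, modify_head_match _ _ _ _ hk hrest]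
      have hout : insertB (keyG [s]) s (g :: t) = (g ++ [s]) :: t := by
        simp only [insertB]
        exact if_pos hk
      rw [hout, List.map_cons]
      have : keyG (g ++ [s]) = keyG [s] := by
        unfold keyG
        rw [headD_append g s (hne g (by simp))]
        exact hk
      rw [this]
    · have hout : insertB (keyG [s]) s (g :: t) = g :: insertB (keyG [s]) s t := by
        simp only [insertB]
        exact if_neg hk
      rw [hout, List.map_cons, List.map_cons, modify_cons _ _ _ _ hk,
        ih (fun g' h' => hne g' (by simp [h'])) hnd.2]

lemma insertB_keys_sub (p : List Int) (s : String) :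
    ∀ gs, (∀ g ∈ gs, g ≠ []) →
      ∀ q ∈ (insertB p s gs).map keyG, q ∈ gs.map keyG ∨ q = keyG [s] := by
  intro gs
  induction gs with
  | nil => intro _ q hq; simp [insertB] at hq; simp [hq]
  | cons g t ih =>
    intro hne q hq
    simp only [insertB] at hq
    split_ifs at hq with hk
    · simp only [List.map_cons, List.mem_cons] at hq ⊢
      rcases hq with h1 | h1
      · left; left
        rw [h1]
        unfold keyG
        rw [headD_append g s (hne g (by simp))]
      · tauto
    · simp only [List.map_cons, List.mem_cons] at hq ⊢
      rcases hq with h1 | h1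
      · tauto
      · rcases ih (fun g' h' => hne g' (by simp [h'])) q h1 with h2 | h2 <;> tauto

lemma insertB_nodup (p : List Int) (s : String) (hp : keyG [s] = p) :
    ∀ gs, (∀ g ∈ gs, g ≠ []) → ((gs.map keyG).Nodup) →
      ((insertB p s gs).map keyG).Nodup := by
  intro gs
  induction gs with
  | nil => intro _ _; simp [insertB]
  | cons g t ih =>
    intro hne hnd
    simp only [List.map_cons, List.nodup_cons] at hnd
    simp only [insertB]
    split_ifs with hk
    · simp only [List.map_cons, List.nodup_cons]
      constructor
      · unfold keyG; rw [headD_append g s (hne g (by simp))]; exact hnd.1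
      · exact hnd.2
    · simp only [List.map_cons, List.nodup_cons]
      refine ⟨fun hmem => ?_, ih (fun g' h' => hne g' (by simp [h'])) hnd.2⟩
      rcases insertB_keys_sub p s t (fun g' h' => hne g' (by simp [h'])) _ hmem with h2 | h2
      · exact hnd.1 h2
      · exact hk (by rw [← hp, ← h2]; rfl)

lemma insertB_ne (p : List Int) (s : String) :
    ∀ gs, (∀ g ∈ gs, g ≠ []) → ∀ g ∈ insertB p s gs, g ≠ [] := by
  intro gs
  induction gs with
  | nil => intro _ g hg; simp [insertB] at hg; simp [hg]
  | cons a t ih =>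
    intro h g hg
    simp only [insertB] at hg
    split_ifs at hg with hk
    · rcases List.mem_cons.mp hg with h1 | h1
      · subst h1; simp
      · exact h g (by simp [h1])
    · rcases List.mem_cons.mp hg with h1 | h1
      · exact h g (by simp [h1])
      · exact ih (fun g' hg' => h g' (by simp [hg'])) g h1

lemma main_fold :
    ∀ (ss : List String) (gs : List (List String)),
      (∀ s ∈ ss, 2 ≤ s.toList.length → ∀ c ∈ s.toList, c ∈ pvCharsA) →
      (∀ g ∈ gs, g ≠ []) → ((gs.map keyG).Nodup) →
      (ss.foldl
        (fun d s =>
          match getShiftPatternA s.toList with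
          | some p => d.modify p [] (fun v => v ++ [s])
          | none => d)
        (PySem.Dict.mk (gs.map (fun g => (keyG g, g))))).values
        = ss.foldl (fun gs s => insertB (patternB s.toList) s gs) gs := by
  intro ss
  induction ss with
  | nil =>
    intro gs _ _ _
    simp [PySem.Dict.values, Function.comp_def]
  | cons s t ih =>
    intro gs hok hne hnd
    have hs := pattern_agree s.toList (hok s (by simp))
    have hps : patternB s.toList = keyG [s] := rfl
    simp only [List.foldl_cons, hs, hps]
    have hitems := modify_items s gs hne hnd
    have hmk : (PySem.Dict.mk (gs.map (fun g => (keyG g, g)))).modify (keyG [s]) []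
        (fun v => v ++ [s])
        = PySem.Dict.mk ((insertB (keyG [s]) s gs).map (fun g => (keyG g, g))) := by
      cases hd : (PySem.Dict.mk (gs.map (fun g => (keyG g, g)))).modify (keyG [s]) []
        (fun v => v ++ [s])
      simpa [hd] using hitems
    rw [hmk]
    exact ih _ (fun s' hs' => hok s' (by simp [hs'])) (insertB_ne _ _ gs hne)
      (insertB_nodup _ _ rfl gs hne hnd)

-- ===== VERDICT (by name: the statement is the Claim_ definition above) =====
theorem groupShiftedStrings_spec : Claim_equal_groupShiftedStrings := by
  intro strList _ hpre
  unfold Spec_groupShiftedStrings groupShiftedStrings groupShiftedStrings_alt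
  rw [PySem.List.foldl_pyRange_zero_pyGetD' strList ""
    (fun d s =>
      match getShiftPatternA s.toList with
      | some p => d.modify p [] (fun v => v ++ [s])
      | none => d)
    PySem.Dict.empty]
  exact main_fold strList [] (fun s hs => pre_conv s (hpre s hs)) (by simp) (by simp)
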